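-- pv_equiv track=rewrite | github.com/isThiago/com_dados | tmp.py | codLin_2b1q
-- ===== SOURCE A (Python) =====
-- def codLin_2b1q(binaryInfo):
--     response = []
--     atN = 0
--     szAns = 0
--     sgn = 1
--     if len(binaryInfo) % 2 == 1:
--         binaryInfo.append(0)
--     for i in range(0, len(binaryInfo)):
--         if i % 2 == 0:
--             atN +=  2 * binaryInfo[i]
--             continue
--         atN += binaryInfo[i]
--         if atN == 0 or atN == 2:
--             response.append(1)
--         else:
--             response.append(3)
--         if atN >= 2:
--             response[szAns] *= -1
--         if szAns > 0 and response[szAns - 1] < 0: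
--             response[szAns] *= -1
--         szAns += 1
--         atN = 0
--     return response
-- ===== SOURCE B (Python) =====
-- # Staged pipeline re-implementation: pair up consecutive symbols (zip on one
-- # iterator), compute magnitudes and sign flips as separate lists, accumulate
-- # the running sign, then combine.  Mutates binaryInfo (pads a 0) like A does.
-- def codLin_2b1q(binaryInfo):
--     if len(binaryInfo) % 2 == 1:
--         binaryInfo.append(0)
--     it = iter(binaryInfo)
--     atns = [2 * a + b for a, b in zip(it, it)]
--     mags = [1 if v == 0 or v == 2 else 3 for v in atns]
--     flips = [-1 if v >= 2 else 1 for v in atns]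
--     signs = []
--     s = 1
--     for f in flips:
--         s *= f
--         signs.append(s)
--     return [m * sg for m, sg in zip(mags, signs)]
-- ===== Notes on version B (the rewrite author's own statement) =====
-- stated objective: alternative
-- what changed: Replaces A's single stateful index loop (running atN accumulator, szAns counter, in-place negations of already-appended elements) with a staged pipeline: pair consecutive symbols, map out magnitudes and sign flips as separate lists, accumulate the running sign, and combine by pointwise multiplication.
import Mathlib
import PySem

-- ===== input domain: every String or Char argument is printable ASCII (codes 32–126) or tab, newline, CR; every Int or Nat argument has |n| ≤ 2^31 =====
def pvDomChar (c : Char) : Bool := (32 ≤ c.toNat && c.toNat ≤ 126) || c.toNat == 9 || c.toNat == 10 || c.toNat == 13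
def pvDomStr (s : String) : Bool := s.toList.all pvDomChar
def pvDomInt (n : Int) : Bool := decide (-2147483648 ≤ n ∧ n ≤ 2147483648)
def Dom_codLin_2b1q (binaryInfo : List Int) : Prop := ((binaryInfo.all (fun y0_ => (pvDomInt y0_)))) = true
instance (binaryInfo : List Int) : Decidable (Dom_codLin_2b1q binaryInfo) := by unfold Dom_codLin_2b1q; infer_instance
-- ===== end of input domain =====

-- B replaces A's single stateful index loop by a staged pipeline (pair, map magnitudes,
-- map sign flips, accumulate the running sign, combine); objective: alternative decomposition.
-- Both Pythons pad the ARGUMENT in place with a trailing 0 when its length is odd;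
-- the theorems here are about the return value (the mutation is identical in A and B anyway).

-- ===== PORT A =====
-- one iteration of A's 'for i in range(0, len(binaryInfo))' loop, state (response, atN, szAns)
def codLin_2b1qStep (st : List Int × Int × Nat) (p : Int × Int) : List Int × Int × Nat :=
  let response := st.1
  let atN := st.2.1
  let szAns := st.2.2
  if PySem.Int.mod p.1 2 = 0 then
    (response, atN + 2 * p.2, szAns)
  else
    let atN := atN + p.2
    let response := response ++ [if atN = 0 ∨ atN = 2 then (1 : Int) else 3]
    let response := if atN ≥ 2 then response.modify szAns (fun v => v * (-1)) else response
    let response :=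
      if szAns > 0 ∧ response.getD (szAns - 1) 0 < 0 then
        response.modify szAns (fun v => v * (-1))
      else response
    (response, 0, szAns + 1)

def codLin_2b1q (binaryInfo : List Int) : List Int :=
  let bi := if binaryInfo.length % 2 = 1 then binaryInfo ++ [0] else binaryInfo
  ((PySem.List.enumerate bi 0).foldl codLin_2b1qStep ([], 0, 0)).1

-- ===== PORT B =====
-- Source B's 'zip(it, it)' on one iterator: consecutive disjoint pairs
def pvPairs : List Int → List (Int × Int)
  | a :: b :: rest => (a, b) :: pvPairs rest
  | _ => []

def codLin_2b1q_alt (binaryInfo : List Int) : List Int :=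
  let bi := if binaryInfo.length % 2 = 1 then binaryInfo ++ [0] else binaryInfo
  let atns := (pvPairs bi).map (fun p => 2 * p.1 + p.2)
  let mags := atns.map (fun v => if v = 0 ∨ v = 2 then (1 : Int) else 3)
  let flips := atns.map (fun v => if v ≥ 2 then (-1 : Int) else 1)
  let signs := (flips.foldl (fun (acc : List Int × Int) f => (acc.1 ++ [acc.2 * f], acc.2 * f)) ([], 1)).1
  (mags.zip signs).map (fun p => p.1 * p.2)

-- ===== PRECONDITION & SPEC =====
def Spec_codLin_2b1q (binaryInfo : List Int) (out : List Int) : Prop := out = codLin_2b1q_alt binaryInfo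
instance (binaryInfo : List Int) (out : List Int) : Decidable (Spec_codLin_2b1q binaryInfo out) := by unfold Spec_codLin_2b1q; infer_instance

-- ===== CLAIM (what is proved, stated in full; the proofs are below) =====
def Claim_equal_codLin_2b1q : Prop := ∀ (binaryInfo : List Int), Dom_codLin_2b1q binaryInfo → Spec_codLin_2b1q binaryInfo (codLin_2b1q binaryInfo)

-- ===== LEMMAS AND PROOFS =====
def pvMag (v : Int) : Int := if v = 0 ∨ v = 2 then 1 else 3
def pvFlip (v : Int) : Int := if v ≥ 2 then -1 else 1

-- reference recursion: output of the coder on a pair list, carrying the running sign s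
def pvGo : List (Int × Int) → Int → List Int
  | [], _ => []
  | (a, b) :: ps, s =>
    (pvMag (2 * a + b) * (s * pvFlip (2 * a + b))) :: pvGo ps (s * pvFlip (2 * a + b))

def pvLastSign (r : List Int) : Int :=
  match r.getLast? with
  | none => 1
  | some v => if v < 0 then -1 else 1

lemma pvModify_append (r : List Int) (x : Int) (g : Int → Int) :
    (r ++ [x]).modify r.length g = r ++ [g x] := by
  induction r with
  | nil => simp [List.modify]
  | cons a t ih => simpa [List.modify] using ih

lemma pvGetD_last : ∀ (r : List Int) (x y : Int), (r ++ [y, x]).getD r.length 0 = y := by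
  intro r
  induction r with
  | nil => intro x y; rfl
  | cons a t ih => intro x y; simpa using ih x y

lemma pvLastSign_append (r : List Int) (x : Int) :
    pvLastSign (r ++ [x]) = if x < 0 then -1 else 1 := by
  simp [pvLastSign]

lemma pvMag_pos (v : Int) : 0 < pvMag v := by
  unfold pvMag; split <;> norm_num

lemma pvFlip_unit (v : Int) : pvFlip v = 1 ∨ pvFlip v = -1 := by
  unfold pvFlip; split <;> simp

lemma pvLastSign_unit (r : List Int) : pvLastSign r = 1 ∨ pvLastSign r = -1 := by
  unfold pvLastSign
  cases r.getLast? with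
  | none => left; rfl
  | some x => by_cases hx : x < 0 <;> simp [hx]

lemma pvStep2 (r : List Int) (k a b : Int) (hk : PySem.Int.mod k 2 = 0)
    (hk1 : ¬ PySem.Int.mod (k + 1) 2 = 0) :
    codLin_2b1qStep (codLin_2b1qStep (r, 0, r.length) (k, a)) (k + 1, b) =
      (r ++ [pvMag (2 * a + b) * (pvLastSign r * pvFlip (2 * a + b))], 0, r.length + 1) := by
  simp only [codLin_2b1qStep, hk, hk1, if_pos, if_neg, not_false_iff]
  simp only [zero_add]
  generalize 2 * a + b = v
  set s : Int := pvLastSign r with hs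
  rw [show (if v = 0 ∨ v = 2 then (1 : Int) else 3) = pvMag v from rfl]
  have h1 : (if v ≥ 2 then (r ++ [pvMag v]).modify r.length (fun x => x * (-1)) else r ++ [pvMag v])
      = r ++ [pvMag v * pvFlip v] := by
    unfold pvFlip; split
    · rw [pvModify_append]
    · simp
  rw [h1]
  rcases List.eq_nil_or_concat' r with rfl | ⟨r', y, rfl⟩
  · have hs0 : s = 1 := by simp [hs, pvLastSign]
    simp [hs0]
  · have hget : ((r' ++ [y]) ++ [pvMag v * pvFlip v]).getD ((r' ++ [y]).length - 1) 0 = y := by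
      have := pvGetD_last r' (pvMag v * pvFlip v) y
      simpa using this
    have hlen : (r' ++ [y]).length > 0 := by simp
    rw [hget]
    have hsy : s = if y < 0 then -1 else 1 := by rw [hs, pvLastSign_append]
    by_cases hy : y < 0
    · have hs' : s = -1 := by rw [hsy]; simp [hy]
      rw [if_pos ⟨hlen, hy⟩, pvModify_append]
      have hval : pvMag v * pvFlip v * -1 = pvMag v * (s * pvFlip v) := by rw [hs']; ring
      rw [hval]
    · have hs' : s = 1 := by rw [hsy]; simp [hy]
      rw [if_neg (by tauto)]
      have hval : pvMag v * pvFlip v = pvMag v * (s * pvFlip v) := by rw [hs']; ring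
      rw [← hval]

lemma pvLastSign_step (r : List Int) (v : Int) :
    pvLastSign (r ++ [pvMag v * (pvLastSign r * pvFlip v)]) = pvLastSign r * pvFlip v := by
  rw [pvLastSign_append]
  have hm := pvMag_pos v
  rcases pvLastSign_unit r with h1 | h1 <;> rcases pvFlip_unit v with h2 | h2 <;>
    rw [h1, h2] <;> simp <;> omega

lemma pvFoldA (m : Nat) : ∀ (l : List Int), l.length = 2 * m → ∀ (k : Int), PySem.Int.mod k 2 = 0 →
    ∀ (r : List Int),
    (PySem.List.enumerate l k).foldl codLin_2b1qStep (r, 0, r.length) =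
      (r ++ pvGo (pvPairs l) (pvLastSign r), 0,
        r.length + (pvGo (pvPairs l) (pvLastSign r)).length) := by
  induction m with
  | zero =>
    intro l hl k hk r
    have : l = [] := by cases l <;> simp_all
    subst this
    simp [PySem.List.enumerate_nil, pvPairs, pvGo]
  | succ n ih =>
    intro l hl k hk r
    obtain ⟨a, b, rest, rfl⟩ : ∃ a b rest, l = a :: b :: rest := by
      match l with
      | [] => simp at hl
      | [a] => simp at hl; omega
      | a :: b :: rest => exact ⟨a, b, rest, rfl⟩
    have hrest : rest.length = 2 * n := by simp at hl; omega
    rw [PySem.Int.mod_eq_emod_of_pos (a := k) (by norm_num)] at hk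
    have hk2 : PySem.Int.mod (k + 2) 2 = 0 := by
      rw [PySem.Int.mod_eq_emod_of_pos (by norm_num)]; omega
    have hk1 : ¬ PySem.Int.mod (k + 1) 2 = 0 := by
      rw [PySem.Int.mod_eq_emod_of_pos (by norm_num)]; omega
    have hk0 : PySem.Int.mod k 2 = 0 := by
      rw [PySem.Int.mod_eq_emod_of_pos (by norm_num)]; omega
    rw [PySem.List.enumerate_cons, PySem.List.enumerate_cons]
    rw [List.foldl_cons, List.foldl_cons, pvStep2 r k a b hk0 hk1]
    have hlen1 : r.length + 1 = (r ++ [pvMag (2 * a + b) * (pvLastSign r * pvFlip (2 * a + b))]).length := by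
      simp
    rw [hlen1, ih rest hrest (k + 1 + 1) (by rw [show k + 1 + 1 = k + 2 by ring]; exact hk2)]
    rw [pvLastSign_step r (2 * a + b)]
    have hgo : pvGo (pvPairs (a :: b :: rest)) (pvLastSign r) =
        (pvMag (2 * a + b) * (pvLastSign r * pvFlip (2 * a + b))) ::
          pvGo (pvPairs rest) (pvLastSign r * pvFlip (2 * a + b)) := rfl
    rw [hgo]
    simp [List.append_assoc]
    omega

-- B-side: the accumulated signs list
def pvSc : List Int → Int → List Int
  | [], _ => []
  | f :: fl, s => (s * f) :: pvSc fl (s * f)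

lemma pvSigns (fl : List Int) : ∀ (acc : List Int) (s : Int),
    (fl.foldl (fun (acc : List Int × Int) f => (acc.1 ++ [acc.2 * f], acc.2 * f)) (acc, s)).1 =
      acc ++ pvSc fl s := by
  induction fl with
  | nil => intro acc s; simp [pvSc]
  | cons f t ih => intro acc s; simp only [List.foldl_cons, pvSc, ih]; simp

lemma pvZipGo (ps : List (Int × Int)) : ∀ (s : Int),
    (((ps.map (fun p => 2 * p.1 + p.2)).map (fun v => if v = 0 ∨ v = 2 then (1 : Int) else 3)).zip
        (pvSc ((ps.map (fun p => 2 * p.1 + p.2)).map (fun v => if v ≥ 2 then (-1 : Int) else 1)) s)).map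
      (fun p => p.1 * p.2) = pvGo ps s := by
  induction ps with
  | nil => intro s; simp [pvSc, pvGo]
  | cons p t ih =>
    intro s
    obtain ⟨a, b⟩ := p
    simp only [List.map_cons, pvSc, List.zip_cons_cons, List.map_cons, pvGo, ih]
    rfl

lemma pvAlt_eq_go (bi : List Int) :
    codLin_2b1q_alt bi =
      pvGo (pvPairs (if bi.length % 2 = 1 then bi ++ [0] else bi)) 1 := by
  simp only [codLin_2b1q_alt]
  rw [pvSigns, List.nil_append, pvZipGo]

-- ===== VERDICT (by name: the statement is the Claim_ definition above) =====
theorem codLin_2b1q_spec : Claim_equal_codLin_2b1q := by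
  unfold Claim_equal_codLin_2b1q
  intro binaryInfo _
  unfold Spec_codLin_2b1q
  rw [pvAlt_eq_go]
  simp only [codLin_2b1q]
  set bi := if binaryInfo.length % 2 = 1 then binaryInfo ++ [0] else binaryInfo with hbi
  have heven : ∃ m, bi.length = 2 * m := by
    rw [hbi]
    by_cases h : binaryInfo.length % 2 = 1
    · simp [h]; exact ⟨(binaryInfo.length + 1) / 2, by omega⟩
    · simp [h]; exact ⟨binaryInfo.length / 2, by omega⟩
  obtain ⟨m, hm⟩ := heven
  have h0 : PySem.Int.mod 0 2 = 0 := by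
    rw [PySem.Int.mod_eq_emod_of_pos (by norm_num)]
    decide
  have := pvFoldA m bi hm 0 h0 []
  simp only [List.length_nil] at this
  rw [this]
  simp [pvLastSign]
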